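-- pv_equiv track=rewrite | github.com/Jmk125/DocDiff | docdiff.py | apply_flags
-- ===== SOURCE A (Python) =====
-- from typing import Any, Dict, List, Optional, Tuple
--
-- def apply_flags(config: Dict[str, Any], text: str) -> List[str]:
--     flags = []
--     t = text.lower()
--     for group, terms in (config.get("flags") or {}).items():
--         for term in terms:
--             if term.lower() in t:
--                 flags.append(group)
--                 break
--     return flags
-- ===== SOURCE B (Python) =====
-- def apply_flags(config, text):
--     t = text.lower()
--     items = list((config.get("flags") or {}).items())
--     hits = {i for i, (_g, terms) in enumerate(items)
--               for term in terms if term.lower() in t}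
--     return [g for i, (g, _terms) in enumerate(items) if i in hits]
-- ===== Notes on version B (the rewrite author's own statement) =====
-- stated objective: alternative
-- what changed: B splits A's single nested loop (with an early break per group) into two passes: one pass over all (group-index, term) pairs that collects the set of matched group indices with no early exit, then a second pass that emits group names in config order by set membership.
import Mathlib
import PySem

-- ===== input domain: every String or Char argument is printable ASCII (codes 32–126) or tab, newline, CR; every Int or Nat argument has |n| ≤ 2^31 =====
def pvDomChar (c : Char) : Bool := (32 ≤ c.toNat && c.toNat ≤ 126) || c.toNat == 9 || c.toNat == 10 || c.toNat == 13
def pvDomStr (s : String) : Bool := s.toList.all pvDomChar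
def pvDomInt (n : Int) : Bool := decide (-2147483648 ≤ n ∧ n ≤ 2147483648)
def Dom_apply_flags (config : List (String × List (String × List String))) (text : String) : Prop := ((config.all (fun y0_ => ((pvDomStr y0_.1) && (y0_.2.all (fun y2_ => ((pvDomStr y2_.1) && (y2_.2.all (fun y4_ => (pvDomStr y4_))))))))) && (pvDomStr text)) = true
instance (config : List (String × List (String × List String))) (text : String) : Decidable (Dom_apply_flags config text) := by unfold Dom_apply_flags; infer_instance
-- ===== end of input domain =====

-- B separates matching from emission (flatten to indexed terms, collect the set of hit
-- group indices with no early break, then emit group names in config order in a second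
-- pass); same result, different decomposition ("alternative"), no speed claim.

-- ===== PORT A =====
-- inner 'for term in terms: … break' loop: true at the first matching term
def apply_flags_scan (t : String) : List String → Bool
  | [] => false
  | term :: rest =>
      if PySem.Str.isIn (PySem.Str.lower term) t then true
      else apply_flags_scan t rest

def apply_flags (config : List (String × List (String × List String))) (text : String) : List String :=
  let t := PySem.Str.lower text
  let items := ((PySem.Dict.mk config).get? "flags").getD []   -- (config.get("flags") or {}).items()
  items.foldl (fun flags p => if apply_flags_scan t p.2 then flags ++ [p.1] else flags) []

-- ===== PORT B =====
-- hits = {i for i, (_g, terms) in enumerate(items) for term in terms if term.lower() in t}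
def apply_flags_alt_hits (t : String) (items : List (String × List String)) : PySem.Set Int :=
  (PySem.List.enumerate items).foldl
    (fun s p => p.2.2.foldl
      (fun s' term => if PySem.Str.isIn (PySem.Str.lower term) t then PySem.Set.add s' p.1 else s') s)
    PySem.Set.empty

def apply_flags_alt (config : List (String × List (String × List String))) (text : String) : List String :=
  let t := PySem.Str.lower text
  let items := ((PySem.Dict.mk config).get? "flags").getD []
  let hits := apply_flags_alt_hits t items
  ((PySem.List.enumerate items).filter (fun p => PySem.Set.contains hits p.1)).map (fun p => p.2.1)

-- ===== PRECONDITION & SPEC =====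
def Spec_apply_flags (config : List (String × List (String × List String))) (text : String) (out : List String) : Prop := out = apply_flags_alt config text
instance (config : List (String × List (String × List String))) (text : String) (out : List String) : Decidable (Spec_apply_flags config text out) := by unfold Spec_apply_flags; infer_instance

-- ===== CLAIM (what is proved, stated in full; the proofs are below) =====
def Claim_equal_apply_flags : Prop := ∀ (config : List (String × List (String × List String))) (text : String), Dom_apply_flags config text → Spec_apply_flags config text (apply_flags config text)

-- ===== LEMMAS AND PROOFS =====

theorem set_add_add_self (s : PySem.Set Int) (x : Int) : (s.add x).add x = s.add x := by
  have h1 : (s.add x).contains x = true :=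
    (PySem.Set.contains_iff _ _).mpr ((PySem.Set.mem_add s x x).mpr (Or.inr rfl))
  conv_lhs => rw [PySem.Set.add]
  rw [h1, if_pos rfl]

-- inner set-comprehension pass over one group's terms collapses to a single conditional add
theorem hits_inner (t : String) (i : Int) (terms : List String) (s : PySem.Set Int) :
    terms.foldl (fun s' term => if PySem.Str.isIn (PySem.Str.lower term) t then PySem.Set.add s' i else s') s
      = if apply_flags_scan t terms then PySem.Set.add s i else s := by
  induction terms generalizing s with
  | nil => simp [apply_flags_scan]
  | cons term rest ih =>
      simp only [List.foldl_cons]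
      by_cases h : PySem.Str.isIn (PySem.Str.lower term) t = true
      · rw [if_pos h, ih]
        have hs : apply_flags_scan t (term :: rest) = true := by
          simp only [apply_flags_scan]; rw [if_pos h]
        rw [if_pos hs]
        by_cases h2 : apply_flags_scan t rest = true
        · rw [if_pos h2, set_add_add_self]
        · rw [if_neg h2]
      · rw [if_neg h, ih]
        have hs : apply_flags_scan t (term :: rest) = apply_flags_scan t rest := by
          simp only [apply_flags_scan]; rw [if_neg h]
        rw [hs]

-- membership in a conditional-add fold over enumerated entries
theorem mem_cond_fold (q : Int × (String × List String) → Bool) :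
    ∀ (l : List (Int × (String × List String))) (s : PySem.Set Int) (j : Int),
    (j ∈ l.foldl (fun s p => if q p then PySem.Set.add s p.1 else s) s)
      ↔ j ∈ s ∨ ∃ p, p ∈ l ∧ q p = true ∧ p.1 = j := by
  intro l
  induction l with
  | nil => intro s j; simp
  | cons p rest ih =>
      intro s j
      simp only [List.foldl_cons]
      by_cases h : q p = true
      · rw [if_pos h, ih]
        constructor
        · rintro (hs | ⟨p', hp', hq, he⟩)
          · rcases (PySem.Set.mem_add s p.1 j).mp hs with hj | hj
            · exact Or.inl hj
            · exact Or.inr ⟨p, List.mem_cons_self, h, hj.symm⟩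
          · exact Or.inr ⟨p', List.mem_cons_of_mem _ hp', hq, he⟩
        · rintro (hs | ⟨p', hp', hq, he⟩)
          · exact Or.inl ((PySem.Set.mem_add s p.1 j).mpr (Or.inl hs))
          · rcases List.mem_cons.mp hp' with rfl | hp''
            · exact Or.inl ((PySem.Set.mem_add s p'.1 j).mpr (Or.inr he.symm))
            · exact Or.inr ⟨p', hp'', hq, he⟩
      · rw [if_neg h, ih]
        constructor
        · rintro (hs | ⟨p', hp', hq, he⟩)
          · exact Or.inl hs
          · exact Or.inr ⟨p', List.mem_cons_of_mem _ hp', hq, he⟩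
        · rintro (hs | ⟨p', hp', hq, he⟩)
          · exact Or.inl hs
          · rcases List.mem_cons.mp hp' with rfl | hp''
            · exact absurd hq h
            · exact Or.inr ⟨p', hp'', hq, he⟩

theorem hits_eq (t : String) (items : List (String × List String)) :
    apply_flags_alt_hits t items
      = (PySem.List.enumerate items).foldl
          (fun s p => if apply_flags_scan t p.2.2 then PySem.Set.add s p.1 else s) PySem.Set.empty := by
  unfold apply_flags_alt_hits
  congr 1
  funext s p
  exact hits_inner t p.1 p.2.2 s

-- index j of an enumerated entry is hit exactly when that entry's own terms match
theorem contains_hits (t : String) (items : List (String × List String))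
    (p : Int × (String × List String)) (hp : p ∈ PySem.List.enumerate items) :
    PySem.Set.contains (apply_flags_alt_hits t items) p.1 = apply_flags_scan t p.2.2 := by
  rw [hits_eq]
  by_cases hscan : apply_flags_scan t p.2.2 = true
  · rw [hscan]
    exact (PySem.Set.contains_iff _ _).mpr
      ((mem_cond_fold (fun p => apply_flags_scan t p.2.2) _ _ _).mpr (Or.inr ⟨p, hp, hscan, rfl⟩))
  · rw [Bool.not_eq_true] at hscan
    rw [hscan]
    apply Bool.eq_false_iff.mpr
    intro hc
    have hm := (PySem.Set.contains_iff _ _).mp hc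
    rw [mem_cond_fold (fun p => apply_flags_scan t p.2.2)] at hm
    rcases hm with hs | ⟨p', hp', hq, he⟩
    · simp [PySem.Set.empty] at hs
    · rcases (PySem.List.mem_enumerate_iff _ _ _).mp hp with ⟨k, hk, rfl⟩
      rcases (PySem.List.mem_enumerate_iff _ _ _).mp hp' with ⟨k', hk', rfl⟩
      simp only at he
      have hkk : k' = k := by exact_mod_cast (by omega : (k' : Int) = k)
      subst hkk
      simp only at hq
      rw [hq] at hscan
      exact Bool.noConfusion hscan

theorem enum_filter_map (t : String) :
    ∀ (items : List (String × List String)) (k : Int),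
    (((PySem.List.enumerate items k).filter (fun p => apply_flags_scan t p.2.2)).map (fun p => p.2.1))
      = ((items.filter (fun x => apply_flags_scan t x.2)).map (fun x => x.1)) := by
  intro items
  induction items with
  | nil => intro k; simp [PySem.List.enumerate_nil]
  | cons x rest ih =>
      intro k
      rw [PySem.List.enumerate_cons]
      by_cases h : apply_flags_scan t x.2 <;> simp [h, ih (k + 1)]

theorem main_items (t : String) (items : List (String × List String)) :
    items.foldl (fun flags p => if apply_flags_scan t p.2 then flags ++ [p.1] else flags) []
      = ((PySem.List.enumerate items).filter
          (fun p => PySem.Set.contains (apply_flags_alt_hits t items) p.1)).map (fun p => p.2.1) := by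
  rw [PySem.List.foldl_append_if (p := fun x : String × List String => apply_flags_scan t x.2)
      (f := fun x : String × List String => x.1)]
  rw [List.filter_congr (q := fun p : Int × (String × List String) => apply_flags_scan t p.2.2)
      (fun p hp => contains_hits t items p hp)]
  rw [enum_filter_map t items 0]
  simp

-- ===== VERDICT (by name: the statement is the Claim_ definition above) =====
theorem apply_flags_spec : Claim_equal_apply_flags := by
  intro config text _
  unfold Spec_apply_flags apply_flags apply_flags_alt
  exact main_items (PySem.Str.lower text) (((PySem.Dict.mk config).get? "flags").getD [])
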